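-- pv_equiv track=rewrite | github.com/JeongGiSeong/Algorithm | 프로그래머스/3/68646. 풍선 터트리기/풍선 터트리기.py | solution
-- ===== SOURCE A (Python) =====
-- def solution(a):
--     # 리스트 중간에 있는 값은 자신 위치의 좌/우 리스트의 최솟값보다 작을 경우 생존 가능
--
--     answer = [0 for _ in range(len(a))]
--     minLeft, minRight = float("inf"), float("inf")
--     for i in range(len(a)):
--         if a[i] < minLeft:
--             minLeft = a[i]
--             answer[i] = 1
--         if a[-1-i] < minRight:
--             minRight = a[-1-i]
--             answer[-1-i] = 1
--     return sum(answer)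
-- ===== SOURCE B (Python) =====
-- def solution(a):
--     # A balloon survives iff it is strictly smaller than everything before it
--     # or strictly smaller than everything after it; count that directly.
--     return sum(
--         1
--         for i, x in enumerate(a)
--         if all(x < y for y in a[:i]) or all(x < y for y in a[i + 1:])
--     )
-- ===== Notes on version B (the rewrite author's own statement) =====
-- stated objective: simpler
-- what changed: A runs one interleaved stateful loop maintaining two running minima and marking a 0/1 indicator array it finally sums; B drops all running state and directly counts, per index, whether the element is strictly below every element of its prefix or of its suffix via a declarative all()-over-slices comprehension.
import Mathlib
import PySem

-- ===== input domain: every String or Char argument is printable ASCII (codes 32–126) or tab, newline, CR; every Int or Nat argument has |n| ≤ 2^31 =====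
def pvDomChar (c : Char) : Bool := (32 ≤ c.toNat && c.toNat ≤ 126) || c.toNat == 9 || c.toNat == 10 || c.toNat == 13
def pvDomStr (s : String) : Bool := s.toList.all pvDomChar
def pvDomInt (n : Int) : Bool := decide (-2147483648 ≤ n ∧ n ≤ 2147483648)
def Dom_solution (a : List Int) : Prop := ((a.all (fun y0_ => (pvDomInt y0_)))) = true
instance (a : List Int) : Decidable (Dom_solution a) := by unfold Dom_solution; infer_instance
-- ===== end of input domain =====

-- B replaces A's single stateful loop (two running minima marking a shared 0/1 array that
-- is summed) by a stateless declarative count: an index survives iff its element is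
-- strictly below every element of its prefix or of its suffix (objective: simpler).

-- Python's 'x < m' with m initialised to float("inf") (none = +infinity)
def ltInf (x : Int) (m : Option Int) : Bool :=
  match m with
  | none => true
  | some v => decide (x < v)

-- ===== PORT A =====

def bodyA (a : List Int) (st : List Int × Option Int × Option Int) (i : Int) :
    List Int × Option Int × Option Int :=
  let p1 := if ltInf (PySem.List.pyGetD a i 0) st.2.1
            then (PySem.List.pySetD st.1 i 1, some (PySem.List.pyGetD a i 0))
            else (st.1, st.2.1)
  let p2 := if ltInf (PySem.List.pyGetD a (-1 - i) 0) st.2.2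
            then (PySem.List.pySetD p1.1 (-1 - i) 1, some (PySem.List.pyGetD a (-1 - i) 0))
            else (p1.1, st.2.2)
  (p2.1, p1.2, p2.2)

def solution (a : List Int) : Int :=
  let answer : List Int := (List.range a.length).map (fun _ => (0 : Int))
  let r := (PySem.List.pyRange 0 (a.length : Int) 1).foldl (bodyA a) (answer, none, none)
  r.1.sum

-- ===== PORT B =====

-- sum(1 for i, x in enumerate(a) if all(x < y for y in a[:i]) or all(x < y for y in a[i+1:]))
def solution_alt (a : List Int) : Int :=
  (((PySem.List.enumerate a).filter (fun ix =>
      (PySem.List.slice a none (some ix.1)).all (fun y => decide (ix.2 < y))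
      || (PySem.List.slice a (some (ix.1 + 1)) none).all (fun y => decide (ix.2 < y)))).length : Int)

-- ===== PRECONDITION & SPEC =====
def Spec_solution (a : List Int) (out : Int) : Prop := out = solution_alt a
instance (a : List Int) (out : Int) : Decidable (Spec_solution a out) := by unfold Spec_solution; infer_instance

-- ===== CLAIM (what is proved, stated in full; the proofs are below) =====
def Claim_equal_solution : Prop := ∀ (a : List Int), Dom_solution a → Spec_solution a (solution a)

-- ===== LEMMAS AND PROOFS =====

-- j survives scanning from the left: strictly smaller than every earlier element
def fwdB (a : List Int) (j : Nat) : Bool := (a.take j).all (fun y => decide (a.getD j 0 < y))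
-- j survives scanning from the right: strictly smaller than every later element
def bwdB (a : List Int) (j : Nat) : Bool := (a.drop (j+1)).all (fun y => decide (a.getD j 0 < y))

lemma pyIdx_neg (n k : Nat) (h : k < n) :
    PySem.List.pyIdx? n (-1 - (k : Int)) = some (n - 1 - k) := by
  simp only [PySem.List.pyIdx?]
  rw [if_neg (by omega), if_pos (by omega)]
  congr 1
  omega

lemma pyGetD_neg (a : List Int) (k : Nat) (h : k < a.length) :
    PySem.List.pyGetD a (-1 - (k : Int)) 0 = a.getD (a.length - 1 - k) 0 := by
  simp [PySem.List.pyGetD, PySem.List.pyGet?, pyIdx_neg _ _ h, List.getD]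

lemma pySetD_neg (l : List Int) (a : List Int) (k : Nat) (h : k < a.length)
    (hl : l.length = a.length) :
    PySem.List.pySetD l (-1 - (k : Int)) 1 = l.set (a.length - 1 - k) 1 := by
  simp [PySem.List.pySetD, PySem.List.pySet?, hl, pyIdx_neg _ _ h]

lemma take_concat (a : List Int) (k : Nat) (h : k < a.length) :
    a.take (k+1) = a.take k ++ [a.getD k 0] := by
  rw [List.take_add_one]
  congr 1
  simp [List.getD, List.getElem?_eq_getElem h]

lemma drop_cons (a : List Int) (k : Nat) (h : k < a.length) :
    a.drop k = a.getD k 0 :: a.drop (k+1) := by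
  rw [List.drop_eq_getElem_cons h]
  simp [List.getD, List.getElem?_eq_getElem h]

lemma minChar_step (x : Int) (m : Option Int) (pre : List Int)
    (hm : ∀ z, ltInf z m = pre.all (fun y => decide (z < y))) :
    ∀ z, ltInf z (if ltInf x m then some x else m)
      = (pre ++ [x]).all (fun y => decide (z < y)) := by
  intro z
  rw [List.all_append, List.all_cons, List.all_nil, Bool.and_true, ← hm z]
  cases m with
  | none => by_cases hd : z < x <;> simp [ltInf, hd]
  | some v =>
    by_cases hc : x < v
    · rw [if_pos (by simp [ltInf, hc])]
      by_cases hz : z < x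
      · have hzv : z < v := by omega
        simp [ltInf, hz, hzv]
      · simp [ltInf, hz]
    · rw [if_neg (by simp [ltInf, hc])]
      by_cases hz : z < v
      · have hzx : z < x := by omega
        simp [ltInf, hz, hzx]
      · simp [ltInf, hz]

lemma set_map_range (n : Nat) (f : Nat → Int) (i : Nat) (_hi : i < n) :
    ((List.range n).map f).set i 1 = (List.range n).map (fun j => if j = i then 1 else f j) := by
  apply List.ext_getElem
  · simp
  · intro j h1 h2
    rw [List.getElem_set]
    simp only [List.getElem_map, List.getElem_range]
    by_cases h : i = j
    · subst h; simp
    · rw [if_neg h, if_neg (fun hh => h hh.symm)]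

lemma pointFinal (a : List Int) (k j : Nat) (hkl : k < a.length) (_hjn : j < a.length) :
    (if bwdB a (a.length - 1 - k) = true ∧ j = a.length - 1 - k then (1:Int)
      else if fwdB a k = true ∧ j = k then 1
      else if (j < k ∧ fwdB a j = true) ∨ (a.length - k ≤ j ∧ bwdB a j = true) then 1 else 0)
    = (if (j < k+1 ∧ fwdB a j = true) ∨ (a.length - (k+1) ≤ j ∧ bwdB a j = true) then 1 else 0) := by
  by_cases hbw : bwdB a (a.length - 1 - k) = true ∧ j = a.length - 1 - k
  · rw [if_pos hbw, if_pos (Or.inr ⟨by omega, hbw.2 ▸ hbw.1⟩)]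
  · rw [if_neg hbw]
    by_cases hfw : fwdB a k = true ∧ j = k
    · rw [if_pos hfw, if_pos (Or.inl ⟨by omega, hfw.2 ▸ hfw.1⟩)]
    · rw [if_neg hfw]
      congr 1
      rw [eq_iff_iff]
      constructor
      · rintro (⟨h1, h2⟩ | ⟨h1, h2⟩)
        · exact Or.inl ⟨by omega, h2⟩
        · exact Or.inr ⟨by omega, h2⟩
      · rintro (⟨h1, h2⟩ | ⟨h1, h2⟩)
        · left
          refine ⟨?_, h2⟩
          rcases Nat.lt_or_ge j k with h | h
          · exact h
          · exact absurd ⟨(show j = k by omega) ▸ h2, by omega⟩ hfw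
        · right
          refine ⟨?_, h2⟩
          rcases Nat.lt_or_ge j (a.length - k) with h | h
          · exact absurd ⟨(show j = a.length - 1 - k by omega) ▸ h2, by omega⟩ hbw
          · exact h

lemma Aloop (a : List Int) : ∀ (k : Nat), k ≤ a.length →
    ∃ mL mR,
      (PySem.List.pyRange 0 (k : Int) 1).foldl (bodyA a)
        ((List.range a.length).map (fun _ => (0 : Int)), none, none)
      = ((List.range a.length).map
          (fun j => if (j < k ∧ fwdB a j = true) ∨ (a.length - k ≤ j ∧ bwdB a j = true)
                    then (1 : Int) else 0), mL, mR)
      ∧ (∀ z, ltInf z mL = (a.take k).all (fun y => decide (z < y)))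
      ∧ (∀ z, ltInf z mR = (a.drop (a.length - k)).all (fun y => decide (z < y))) := by
  intro k
  induction k with
  | zero =>
    intro _
    refine ⟨none, none, ?_, fun z => rfl, fun z => by simp [ltInf]⟩
    rw [show ((0:Nat) : Int) = 0 from rfl, PySem.List.pyRange_one_eq_nil le_rfl]
    simp only [List.foldl_nil]
    congr 1
    apply List.map_congr_left
    intro j hj
    rw [if_neg]
    rintro (⟨h1, -⟩ | ⟨h1, -⟩)
    · omega
    · have := List.mem_range.mp hj; omega
  | succ k ih =>
    intro hk
    obtain ⟨mL, mR, heq, hmL, hmR⟩ := ih (by omega)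
    have hkl : k < a.length := by omega
    rw [show ((k+1 : Nat) : Int) = (k : Int) + 1 by push_cast; ring,
      PySem.List.pyRange_one_succ_right (by omega), List.foldl_append, List.foldl_cons,
      List.foldl_nil, heq]
    refine ⟨(if ltInf (a.getD k 0) mL then some (a.getD k 0) else mL),
            (if ltInf (a.getD (a.length-1-k) 0) mR then some (a.getD (a.length-1-k) 0) else mR),
            ?_, ?_, ?_⟩
    · have hF0 : ltInf (a.getD k 0) mL = fwdB a k := hmL (a.getD k 0)
      have hB0 : ltInf (a.getD (a.length - 1 - k) 0) mR = bwdB a (a.length - 1 - k) := by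
        rw [hmR (a.getD (a.length - 1 - k) 0), bwdB,
          show (a.length - 1 - k) + 1 = a.length - k by omega]
      simp only [bodyA, PySem.List.pyGetD_natCast, pyGetD_neg a k hkl, hF0, hB0]
      by_cases hF : fwdB a k = true <;> by_cases hB : bwdB a (a.length - 1 - k) = true <;>
        simp only [hF, hB, if_true, if_false, Bool.false_eq_true] <;>
        refine Prod.ext ?_ rfl <;>
        [ rw [PySem.List.pySetD_natCast, pySetD_neg _ a k hkl (by simp),
            set_map_range a.length _ k hkl, set_map_range a.length _ (a.length - 1 - k) (by omega)]
        ; rw [PySem.List.pySetD_natCast, set_map_range a.length _ k hkl]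
        ; rw [pySetD_neg _ a k hkl (by simp), set_map_range a.length _ (a.length - 1 - k) (by omega)]
        ; skip ] <;>
        (apply List.map_congr_left
         intro j hj
         have hp := pointFinal a k j hkl (List.mem_range.mp hj)
         simp only [hF, hB, true_and] at hp
         exact hp)
    · -- mL characterisation
      have h := minChar_step (a.getD k 0) mL (a.take k) hmL
      intro z
      rw [h z, ← take_concat a k hkl]
    · -- mR characterisation
      have h := minChar_step (a.getD (a.length-1-k) 0) mR (a.drop (a.length - k)) hmR
      intro z
      rw [show a.length - (k+1) = a.length - 1 - k by omega]
      rw [drop_cons a (a.length - 1 - k) (by omega),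
        show (a.length - 1 - k) + 1 = a.length - k by omega]
      rw [h z, List.all_append, List.all_cons, List.all_nil, List.all_cons, Bool.and_true,
        Bool.and_comm]

lemma solution_eq_countP (a : List Int) :
    solution a = ((List.range a.length).countP (fun j => fwdB a j || bwdB a j) : Int) := by
  unfold solution
  obtain ⟨mL, mR, heq, -, -⟩ := Aloop a a.length le_rfl
  simp only [heq]
  have hcong : ∀ j ∈ List.range a.length,
      (if (j < a.length ∧ fwdB a j = true) ∨ (a.length - a.length ≤ j ∧ bwdB a j = true)
       then (1:Int) else 0)
      = (if (fwdB a j || bwdB a j) = true then (1:Int) else 0) := by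
    intro j hj
    have hj' := List.mem_range.mp hj
    congr 1
    rw [eq_iff_iff, Bool.or_eq_true]
    constructor
    · rintro (⟨-, h⟩ | ⟨-, h⟩)
      · exact Or.inl h
      · exact Or.inr h
    · rintro (h | h)
      · exact Or.inl ⟨hj', h⟩
      · exact Or.inr ⟨by omega, h⟩
  rw [List.map_congr_left hcong, PySem.List.sum_map_ite_one_zero]

lemma solution_alt_eq_countP (a : List Int) :
    solution_alt a = ((List.range a.length).countP (fun j => fwdB a j || bwdB a j) : Int) := by
  unfold solution_alt
  congr 1
  rw [PySem.List.enumerate_eq_map_pyRange a 0, PySem.List.len_eq, PySem.List.pyRange_zero_natCast,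
    List.map_map, List.filter_map, List.length_map, ← List.countP_eq_length_filter]
  apply List.countP_congr
  intro k hk
  have hk' : k < a.length := by simpa using hk
  simp only [Function.comp_apply, PySem.List.pyGetD_natCast,
    PySem.List.slice_to_natCast]
  rw [show ((k : Int) + 1) = (((k+1 : Nat)) : Int) by push_cast; ring,
    PySem.List.slice_from_natCast]
  rfl

-- ===== VERDICT (by name: the statement is the Claim_ definition above) =====
theorem solution_spec : Claim_equal_solution := by
  intro a _
  unfold Spec_solution
  rw [solution_eq_countP, solution_alt_eq_countP]
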